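-- pv_equiv track=rewrite | github.com/kangmj921/kangmj921 | boardcover.py | bdcover
-- ===== SOURCE A (Python) =====
-- coverType = [[[0, 0], [1, 0], [0, 1]],
--              [[0, 0], [0, 1], [1, 1]],
--              [[0, 0], [1, 0], [1, 1]],
--              [[0, 0], [1, 0], [1, -1]]]
--
-- def setting(pan, x, y, ty, delta):
--     ok = True
--     for i in range(0, 3):
--         ny = y + coverType[ty][i][0]
--         nx = x + coverType[ty][i][1]
--         if ny < 0 or ny >= len(pan) or nx < 0 or nx >= len(pan[0]):
--             ok = False
--         else:
--             pan[ny][nx] += delta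
--             if (pan[ny][nx]) > 1:
--                 ok = False
--     return ok
--
-- def bdcover(pan):
--     y = -1
--     x = -1
--     for i in range(0, len(pan)):
--         for j in range(0, len(pan[i])):
--             if pan[i][j] == 0:
--                 y = i
--                 x = j
--                 break
--         if y != -1:
--             break
--     if y == -1:
--         return 1
--     ret = 0
--     for t in range(0, 4):
--         if setting(pan, x, y, t, 1):
--             ret += bdcover(pan)
--         setting(pan, x, y, t, -1)
--     return ret
-- ===== SOURCE B (Python) =====
-- SHAPES = [((0, 0), (1, 0), (0, 1)),
--           ((0, 0), (0, 1), (1, 1)),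
--           ((0, 0), (1, 0), (1, 1)),
--           ((0, 0), (1, 0), (1, -1))]
--
-- def bdcover(pan):
--     # Forward level-by-level dynamic programming over aggregated board states.
--     # A state is the dict of still-coverable cells (value v <= 0, in row-major
--     # order) mapped to how many more covers each needs/admits (1 - v); states
--     # reached by different placement orders coincide and their way-counts are
--     # merged, so each distinct state is expanded once per level.
--     cells = {}
--     for i, row in enumerate(pan):
--         for j, v in enumerate(row):
--             if v <= 0:
--                 cells[(i, j)] = 1 - v
--     frontier = {tuple(cells.items()): 1}
--     done = 0
--     while frontier:
--         nxt = {}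
--         for key, ways in frontier.items():
--             cnt = dict(key)
--             zs = [c for c, n in cnt.items() if n == 1]
--             if not zs:
--                 done += ways
--                 continue
--             y, x = zs[0]
--             for shape in SHAPES:
--                 cs = [(y + dy, x + dx) for dy, dx in shape]
--                 if all(c in cnt for c in cs):
--                     d2 = dict(cnt)
--                     for c in cs:
--                         d2[c] -= 1
--                         if d2[c] == 0:
--                             del d2[c]
--                     k2 = tuple(d2.items())
--                     nxt[k2] = nxt.get(k2, 0) + ways
--         frontier = nxt
--     return done
-- ===== Notes on version B (the rewrite author's own statement) =====
-- stated objective: alternative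
-- what changed: B replaces A's recursive backtracking with an iterative level-by-level forward dynamic programming: a frontier dict maps each reachable board state (the row-major dict of still-coverable cells with remaining cover counts) to its number of ways, merging states reached by different placement orders so each distinct state is expanded once per level, instead of A's depth-first in-place place/recurse/undo walk.
-- outside the precondition, e.g. on bdcover([[0], [0, 0]]): A returns 0, B returns 1; on bdcover([[0, 0], [0]]): A raises IndexError, B returns 1
import Mathlib
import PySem

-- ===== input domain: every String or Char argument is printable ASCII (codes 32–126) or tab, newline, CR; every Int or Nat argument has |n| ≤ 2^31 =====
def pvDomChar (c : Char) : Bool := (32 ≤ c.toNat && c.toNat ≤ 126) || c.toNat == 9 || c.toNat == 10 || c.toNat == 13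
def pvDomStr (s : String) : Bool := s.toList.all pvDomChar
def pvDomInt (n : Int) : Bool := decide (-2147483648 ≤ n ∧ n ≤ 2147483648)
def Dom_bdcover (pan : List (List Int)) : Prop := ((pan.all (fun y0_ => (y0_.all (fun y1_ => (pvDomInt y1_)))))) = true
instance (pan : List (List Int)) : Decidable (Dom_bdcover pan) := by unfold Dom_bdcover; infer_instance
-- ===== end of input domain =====

-- B replaces A's recursive backtracking by an iterative forward level-by-level dynamic
-- programming over aggregated board states: each state (the dict of still-coverable cells
-- with their remaining cover counts) carries a way-count, and states reached by different
-- placement orders are merged before being expanded; equivalence is claimed for rectangular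
-- boards (return value only; A mutates its argument in place, restoring it before returning).

-- ===== PORT A =====
def coverType : List (List (Int × Int)) :=
  [[(0, 0), (1, 0), (0, 1)],
   [(0, 0), (0, 1), (1, 1)],
   [(0, 0), (1, 0), (1, 1)],
   [(0, 0), (1, 0), (1, -1)]]

-- setting(pan, x, y, ty, delta): loop i in range(3), bounds check, pan[ny][nx] += delta, ok flag
def setting (pan : List (List Int)) (x y : Int) (ty : Nat) (delta : Int) :
    List (List Int) × Bool :=
  (List.range 3).foldl (fun st i =>
    let dd := (coverType.getD ty []).getD i (0, 0)
    let ny := y + dd.1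
    let nx := x + dd.2
    if ny < 0 ∨ (st.1.length : Int) ≤ ny ∨ nx < 0 ∨ ((st.1.headD []).length : Int) ≤ nx then
      (st.1, false)
    else
      let row := st.1.getD ny.toNat []
      let v := row.getD nx.toNat 0 + delta
      (st.1.set ny.toNat (row.set nx.toNat v), if 1 < v then false else st.2))
    (pan, true)

-- the double search loop for the first cell equal to 0 (row major)
def firstZeroRow : List Int → Int → Option Int
  | [], _ => none
  | v :: rest, j => if v = 0 then some j else firstZeroRow rest (j + 1)

def firstZeroAux : List (List Int) → Int → Option (Int × Int)
  | [], _ => none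
  | row :: rest, i =>
    match firstZeroRow row 0 with
    | some j => some (i, j)
    | none => firstZeroAux rest (i + 1)

-- the recursion; fuel (cells+1) is only a termination device, never exhausted on Pre_ inputs
def bdcoverFuel : Nat → List (List Int) → Int
  | 0, _ => 0
  | f + 1, pan =>
    match firstZeroAux pan 0 with
    | none => 1
    | some (y, x) =>
      ((List.range 4).foldl (fun (st : Int × List (List Int)) t =>
          let r := setting st.2 x y t 1
          ((if r.2 then st.1 + bdcoverFuel f r.1 else st.1), (setting r.1 x y t (-1)).1))
        (0, pan)).1

def bdcover (pan : List (List Int)) : Int :=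
  bdcoverFuel (pan.foldl (fun a r => r.foldl (fun b v => b + ((1 - v).toNat + 1)) a) 0 + 1) pan

-- ===== PORT B =====
def shapesB : List (List (Int × Int)) :=
  [[(0, 0), (1, 0), (0, 1)],
   [(0, 0), (0, 1), (1, 1)],
   [(0, 0), (1, 0), (1, 1)],
   [(0, 0), (1, 0), (1, -1)]]

-- the cells dict: each cell with value v <= 0, in row-major insertion order, mapped to 1 - v
def zcnt (pan : List (List Int)) : List ((Int × Int) × Int) :=
  (PySem.List.enumerate pan 0).flatMap (fun p =>
    (PySem.List.enumerate p.2 0).filterMap (fun q =>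
      if q.2 ≤ 0 then some ((p.1, q.1), 1 - q.2) else none))

-- d2[c] -= 1; if d2[c] == 0: del d2[c]   (in-place update keeps dict order)
def decStep (l : List ((Int × Int) × Int)) (c : Int × Int) : List ((Int × Int) × Int) :=
  l.filterMap (fun p =>
    if p.1 = c then (if p.2 - 1 = 0 then none else some (p.1, p.2 - 1)) else some p)

-- place one shape at the first empty cell (y, x) of state cnt, if it fits, and merge the
-- child state's way-count into the next-level dict: nxt[k2] = nxt.get(k2, 0) + ways
def placeStep (cnt : List ((Int × Int) × Int)) (ways : Int) (y x : Int)
    (nxt : PySem.Dict (List ((Int × Int) × Int)) Int) (shape : List (Int × Int)) :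
    PySem.Dict (List ((Int × Int) × Int)) Int :=
  let cells := shape.map (fun d => (y + d.1, x + d.2))
  if cells.all (fun c => cnt.any (fun q => q.1 == c)) then
    nxt.modify (cells.foldl decStep cnt) 0 (· + ways)
  else nxt

-- expand one frontier entry (key, ways): retire a completed state into done, or try the
-- four shapes at the first empty cell
def levelStep (acc : Int × PySem.Dict (List ((Int × Int) × Int)) Int)
    (p : List ((Int × Int) × Int) × Int) :
    Int × PySem.Dict (List ((Int × Int) × Int)) Int :=
  match p.1.filterMap (fun q => if q.2 = 1 then some q.1 else none) with
  | [] => (acc.1 + p.2, acc.2)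
  | (y, x) :: _ => (acc.1, shapesB.foldl (placeStep p.1 p.2 y x) acc.2)

-- the while loop; fuel (total cover count + 1) is only a termination device, never exhausted
def loopB : Nat → Int → PySem.Dict (List ((Int × Int) × Int)) Int → Int
  | 0, done, _ => done
  | f + 1, done, frontier =>
    if frontier.items.isEmpty then done
    else
      let r := frontier.items.foldl levelStep (done, PySem.Dict.empty)
      loopB f r.1 r.2

def bdcover_alt (pan : List (List Int)) : Int :=
  loopB (((zcnt pan).map (fun p => p.2.toNat)).sum + 1) 0
    (PySem.Dict.ofList [(zcnt pan, 1)])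

-- ===== PRECONDITION & SPEC =====
-- Pre_ admits every board with no empty (0) cell (both programs return 1 there) and otherwise
-- requires a rectangular board (every row as long as row 0); it excludes ragged boards with an
-- empty cell, on which A can raise IndexError (a row shorter than row 0) or rejects placements
-- in columns beyond row 0's width that B's board-free recursion accepts.
def Pre_bdcover (pan : List (List Int)) : Prop :=
  (∀ row ∈ pan, ∀ v ∈ row, v ≠ 0) ∨ (∀ row ∈ pan, row.length = (pan.headD []).length)
instance (pan : List (List Int)) : Decidable (Pre_bdcover pan) := by
  unfold Pre_bdcover; infer_instance

def pvWitness_bdcover : List (List Int) := [[0, 0, 0], [0, 0, 1], [1, 0, 0]]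

def Spec_bdcover (pan : List (List Int)) (out : Int) : Prop := out = bdcover_alt pan
instance (pan : List (List Int)) (out : Int) : Decidable (Spec_bdcover pan out) := by
  unfold Spec_bdcover; infer_instance

-- ===== CLAIM (what is proved, stated in full; the proofs are below) =====
def Claim_equal_bdcover : Prop :=
  ∀ (pan : List (List Int)), Dom_bdcover pan → Pre_bdcover pan → Spec_bdcover pan (bdcover pan)

-- ===== LEMMAS AND PROOFS =====

-- the common yardstick both ports are measured against: the naive per-state count recursion
def countAux : Nat → List ((Int × Int) × Int) → Int
  | 0, _ => 0
  | f + 1, cnt =>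
    match cnt.filterMap (fun p => if p.2 = 1 then some p.1 else none) with
    | [] => 1
    | (y, x) :: _ =>
      shapesB.foldl (fun total shape =>
        let cells := shape.map (fun d => (y + d.1, x + d.2))
        if cells.all (fun c => cnt.any (fun p => p.1 == c)) then
          total + countAux f (cells.foldl decStep cnt)
        else total) 0

-- value of the grid at a coordinate (0 outside), and the in-bounds predicate
def gval (pan : List (List Int)) (c : Int × Int) : Int :=
  (pan.getD c.1.toNat []).getD c.2.toNat 0

@[reducible] def inB (pan : List (List Int)) (c : Int × Int) : Prop :=
  0 ≤ c.1 ∧ c.1 < (pan.length : Int) ∧ 0 ≤ c.2 ∧ c.2 < ((pan.headD []).length : Int)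

def Rect (pan : List (List Int)) : Prop := ∀ row ∈ pan, row.length = (pan.headD []).length
def RectG (pan : List (List Int)) : Prop :=
  ∀ k < pan.length, (pan.getD k []).length = (pan.headD []).length

def sameShape (p q : List (List Int)) : Prop :=
  p.length = q.length ∧ ∀ k, (p.getD k []).length = (q.getD k []).length

-- one step of setting's inner loop, on an explicit target cell
def stepA (δ : Int) (st : List (List Int) × Bool) (c : Int × Int) : List (List Int) × Bool :=
  if c.1 < 0 ∨ (st.1.length : Int) ≤ c.1 ∨ c.2 < 0 ∨ ((st.1.headD []).length : Int) ≤ c.2 then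
    (st.1, false)
  else
    let row := st.1.getD c.1.toNat []
    let v := row.getD c.2.toNat 0 + δ
    (st.1.set c.1.toNat (row.set c.2.toNat v), if 1 < v then false else st.2)

def cellsT (t : Nat) (y x : Int) : List (Int × Int) :=
  (shapesB.getD t []).map (fun d => (y + d.1, x + d.2))

lemma setting_eq_fold (pan : List (List Int)) (x y δ : Int) (t : Nat) (ht : t < 4) :
    setting pan x y t δ = (cellsT t y x).foldl (stepA δ) (pan, true) := by
  interval_cases t <;> rfl

lemma headD_len (p : List (List Int)) : (p.headD []).length = (p.getD 0 []).length := by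
  cases p <;> simp [List.getD]

lemma rect_iff (pan : List (List Int)) : Rect pan ↔ RectG pan := by
  constructor
  · intro h k hk
    rw [List.getD_eq_getElem _ _ hk]
    exact h _ (List.getElem_mem hk)
  · intro h row hrow
    obtain ⟨k, hk, rfl⟩ := List.mem_iff_getElem.mp hrow
    rw [← List.getD_eq_getElem _ ([] : List Int) hk]
    exact h k hk

lemma sameShape_refl (p : List (List Int)) : sameShape p p := ⟨rfl, fun _ => rfl⟩

lemma sameShape_trans {p q r : List (List Int)} :
    sameShape p q → sameShape q r → sameShape p r :=
  fun h1 h2 => ⟨h1.1.trans h2.1, fun k => (h1.2 k).trans (h2.2 k)⟩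

lemma getD_set' {α : Type} (l : List α) (n : Nat) (a : α) (m : Nat) (d : α) :
    (l.set n a).getD m d = if n = m ∧ n < l.length then a else l.getD m d := by
  simp only [List.getD, List.getElem?_set]
  split_ifs with h1 h2 <;> simp_all <;> omega

lemma stepA_shape (δ : Int) (st : List (List Int) × Bool) (c : Int × Int) :
    sameShape (stepA δ st c).1 st.1 := by
  unfold stepA
  split
  · exact sameShape_refl _
  · refine ⟨List.length_set, fun k => ?_⟩
    rw [getD_set']
    split_ifs with h
    · rw [List.length_set, ← h.1]
    · rfl

lemma fold_shape (δ : Int) (cs : List (Int × Int)) (st : List (List Int) × Bool) :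
    sameShape ((cs.foldl (stepA δ) st).1) st.1 := by
  induction cs generalizing st with
  | nil => exact sameShape_refl _
  | cons c cs ih => exact sameShape_trans (ih _) (stepA_shape δ st c)

lemma inB_of_sameShape {p q : List (List Int)} (h : sameShape p q) (c : Int × Int) :
    inB p c ↔ inB q c := by
  have hl : (p.length : Int) = q.length := by exact_mod_cast h.1
  have hw : ((p.headD []).length : Int) = (q.headD []).length := by
    rw [headD_len, headD_len, h.2 0]
  unfold inB
  rw [hl, hw]

lemma rectG_of_sameShape {p q : List (List Int)} (h : sameShape q p) (hr : RectG p) :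
    RectG q := by
  intro k hk
  rw [h.2 k, headD_len, h.2 0, ← headD_len]
  exact hr k (h.1 ▸ hk)

lemma row_ext {r s : List Int} (hl : r.length = s.length)
    (hv : ∀ b : Nat, r.getD b 0 = s.getD b 0) : r = s := by
  apply List.ext_getElem hl
  intro i h1 h2
  rw [← List.getD_eq_getElem r 0 h1, ← List.getD_eq_getElem s 0 h2]
  exact hv i

lemma grid_ext {p q : List (List Int)} (h : sameShape p q)
    (hv : ∀ a b : Nat, (p.getD a []).getD b 0 = (q.getD a []).getD b 0) : p = q := by
  induction p generalizing q with
  | nil =>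
    have := h.1
    cases q
    · rfl
    · simp at this
  | cons a p' ih =>
    cases q with
    | nil => simp [sameShape] at h
    | cons b q' =>
      have hab : a = b := by
        apply row_ext
        · have := h.2 0; simpa [List.getD] using this
        · intro b0; have := hv 0 b0; simpa [List.getD] using this
      have hsh : sameShape p' q' := by
        refine ⟨by simpa using h.1, fun k => ?_⟩
        have := h.2 (k + 1); simpa [List.getD] using this
      have htl : p' = q' := ih hsh (fun a0 b0 => by
        have := hv (a0 + 1) b0; simpa [List.getD] using this)
      rw [hab, htl]

lemma stepA_fst_val (δ : Int) (st : List (List Int) × Bool) (hr : RectG st.1)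
    (c d : Int × Int) (hd1 : 0 ≤ d.1) (hd2 : 0 ≤ d.2) :
    gval (stepA δ st c).1 d =
      gval st.1 d + (if d = c ∧ inB st.1 c then δ else 0) := by
  unfold stepA
  split
  · rename_i hoob
    have : ¬ (d = c ∧ inB st.1 c) := by
      rintro ⟨-, hin⟩; unfold inB at hin; omega
    rw [if_neg this]; ring
  · rename_i hoob
    push_neg at hoob
    obtain ⟨h1, h2, h3, h4⟩ := hoob
    have hin : inB st.1 c := ⟨h1, h2, h3, h4⟩
    have hcl : c.1.toNat < st.1.length := by unfold inB at hin; omega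
    have hrowlen : (st.1.getD c.1.toNat []).length = (st.1.headD []).length := hr _ hcl
    have hc2 : c.2.toNat < (st.1.getD c.1.toNat []).length := by
      rw [hrowlen]; unfold inB at hin; omega
    simp only [gval]
    by_cases hdc : d = c
    · subst hdc
      rw [getD_set', if_pos ⟨rfl, hcl⟩, getD_set', if_pos ⟨rfl, hc2⟩, if_pos ⟨rfl, hin⟩]
    · rw [if_neg (fun h => hdc h.1)]
      by_cases hrow : c.1.toNat = d.1.toNat
      · have hcol : c.2.toNat ≠ d.2.toNat := by
          intro h
          exact hdc (Prod.ext_iff.mpr ⟨by omega, by omega⟩)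
        rw [getD_set', if_pos ⟨hrow, hcl⟩, getD_set', if_neg (fun h => hcol h.1), ← hrow]
        ring
      · rw [getD_set', if_neg (fun h => hrow h.1)]
        ring

lemma fold_val (δ : Int) (cs : List (Int × Int)) (hnd : cs.Nodup)
    (st : List (List Int) × Bool) (hr : RectG st.1)
    (d : Int × Int) (hd1 : 0 ≤ d.1) (hd2 : 0 ≤ d.2) :
    gval ((cs.foldl (stepA δ) st).1) d =
      gval st.1 d + (if d ∈ cs ∧ inB st.1 d then δ else 0) := by
  induction cs generalizing st with
  | nil => simp
  | cons c cs ih =>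
    rw [List.foldl_cons]
    have hcs : c ∉ cs := (List.nodup_cons.mp hnd).1
    have hnd' : cs.Nodup := (List.nodup_cons.mp hnd).2
    have hsh := stepA_shape δ st c
    rw [ih hnd' _ (rectG_of_sameShape hsh hr)]
    rw [stepA_fst_val δ st hr c d hd1 hd2]
    have hib : inB (stepA δ st c).1 d ↔ inB st.1 d := inB_of_sameShape hsh d
    by_cases hdc : d = c
    · subst hdc
      have hnmem : ¬ (d ∈ cs ∧ inB (stepA δ st d).1 d) := fun h => hcs h.1
      rw [if_neg hnmem]
      by_cases hin : inB st.1 d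
      · rw [if_pos ⟨rfl, hin⟩, if_pos ⟨List.mem_cons_self, hin⟩]
        ring
      · rw [if_neg (fun h => hin h.2), if_neg (fun h => hin h.2)]
        ring
    · rw [if_neg (fun h => hdc h.1)]
      by_cases hmem : d ∈ cs
      · by_cases hin : inB st.1 d
        · rw [if_pos ⟨hmem, hib.mpr hin⟩, if_pos ⟨List.mem_cons_of_mem _ hmem, hin⟩]
          ring
        · rw [if_neg (fun h => hin (hib.mp h.2)), if_neg (fun h => hin h.2)]
          ring
      · rw [if_neg (fun h => hmem h.1)]
        have : ¬ (d ∈ c :: cs ∧ inB st.1 d) := by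
          rintro ⟨hm, -⟩
          rcases List.mem_cons.mp hm with h | h
          · exact hdc h
          · exact hmem h
        rw [if_neg this]
        ring

lemma fold_snd_false' (δ : Int) (cs : List (Int × Int)) :
    ∀ st : List (List Int) × Bool, st.2 = false → ((cs.foldl (stepA δ) st).2 = false) := by
  induction cs with
  | nil => intro st h; simpa using h
  | cons c cs ih =>
    intro st h
    rw [List.foldl_cons]
    apply ih
    unfold stepA
    split
    · rfl
    · simp only []
      split_ifs
      · rfl
      · exact h

lemma fold_snd (δ : Int) (cs : List (Int × Int)) (hnd : cs.Nodup)
    (p : List (List Int)) (hr : RectG p) :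
    (cs.foldl (stepA δ) (p, true)).2 = true ↔
      ∀ c ∈ cs, inB p c ∧ gval p c + δ ≤ 1 := by
  induction cs generalizing p with
  | nil => simp
  | cons c cs ih =>
    have hcs : c ∉ cs := (List.nodup_cons.mp hnd).1
    have hnd' : cs.Nodup := (List.nodup_cons.mp hnd).2
    rw [List.foldl_cons]
    set st' := stepA δ (p, true) c with hst'
    have hsh : sameShape st'.1 p := stepA_shape δ (p, true) c
    have hval : ∀ c' : Int × Int, inB p c' → c ≠ c' → gval st'.1 c' = gval p c' := by
      intro c' hin' hne
      rw [hst', stepA_fst_val δ (p, true) hr c c'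
            (by unfold inB at hin'; omega) (by unfold inB at hin'; omega),
          if_neg (by rintro ⟨rfl, -⟩; exact hne rfl)]
      ring
    by_cases hin : inB p c
    · have hoob : ¬ (c.1 < 0 ∨ ((p.length : Int)) ≤ c.1 ∨ c.2 < 0 ∨
          ((p.headD []).length : Int) ≤ c.2) := by
        unfold inB at hin; omega
      by_cases hv : 1 < gval p c + δ
      · have hv' : 1 < (p.getD c.1.toNat []).getD c.2.toNat 0 + δ := hv
        have hsnd : st'.2 = false := by
          rw [hst']; simp only [stepA]; rw [if_neg hoob]; dsimp only; rw [if_pos hv']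
        rw [fold_snd_false' δ cs st' hsnd]
        constructor
        · intro h; exact absurd h (by simp)
        · intro h
          have h2 := (h c List.mem_cons_self).2
          omega
      · have hv' : ¬ 1 < (p.getD c.1.toNat []).getD c.2.toNat 0 + δ := hv
        have hsnd : st'.2 = true := by
          rw [hst']; simp only [stepA]; rw [if_neg hoob]; dsimp only; rw [if_neg hv']
        have hpair : st' = (st'.1, true) := by rw [← hsnd]
        rw [hpair, ih hnd' st'.1 (rectG_of_sameShape hsh hr)]
        constructor
        · intro h
          refine List.forall_mem_cons.mpr ⟨⟨hin, by omega⟩, fun c' hc' => ?_⟩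
          obtain ⟨h1, h2⟩ := h c' hc'
          have hib := (inB_of_sameShape hsh c').mp h1
          refine ⟨hib, ?_⟩
          rw [← hval c' hib (fun he => hcs (he ▸ hc'))]
          exact h2
        · intro h c' hc'
          obtain ⟨h1, h2⟩ := (List.forall_mem_cons.mp h).2 c' hc'
          refine ⟨(inB_of_sameShape hsh c').mpr h1, ?_⟩
          rw [hval c' h1 (fun he => hcs (he ▸ hc'))]
          exact h2
    · have hoob : c.1 < 0 ∨ ((p.length : Int)) ≤ c.1 ∨ c.2 < 0 ∨
          ((p.headD []).length : Int) ≤ c.2 := by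
        unfold inB at hin; omega
      have hsnd : st'.2 = false := by
        rw [hst']; simp only [stepA]; rw [if_pos hoob]
      rw [fold_snd_false' δ cs st' hsnd]
      constructor
      · intro h; exact absurd h (by simp)
      · intro h; exact absurd (h c List.mem_cons_self).1 hin

lemma fold_undo (cs : List (Int × Int)) (hnd : cs.Nodup) (p : List (List Int)) (hr : RectG p) :
    ((cs.foldl (stepA (-1)) (((cs.foldl (stepA 1) (p, true)).1), true))).1 = p := by
  have hsh1 : sameShape ((cs.foldl (stepA 1) (p, true)).1) p := fold_shape 1 cs (p, true)
  have hr1 : RectG ((cs.foldl (stepA 1) (p, true)).1) := rectG_of_sameShape hsh1 hr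
  have hsh2 := fold_shape (-1) cs (((cs.foldl (stepA 1) (p, true)).1), true)
  apply grid_ext (sameShape_trans hsh2 hsh1)
  intro a b
  have key : ∀ d : Int × Int, 0 ≤ d.1 → 0 ≤ d.2 →
      gval ((cs.foldl (stepA (-1)) (((cs.foldl (stepA 1) (p, true)).1), true))).1 d = gval p d := by
    intro d hd1 hd2
    rw [fold_val (-1) cs hnd (((cs.foldl (stepA 1) (p, true)).1), true) hr1 d hd1 hd2,
        fold_val 1 cs hnd (p, true) hr d hd1 hd2]
    rw [if_congr (and_congr_right' (inB_of_sameShape hsh1 d)) rfl rfl]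
    split_ifs <;> ring
  have := key ((a : Int), (b : Int)) (by positivity) (by positivity)
  simpa [gval] using this

lemma filterMap_if {α β : Type} (l : List α) (p : α → Prop) [DecidablePred p] (g : α → β) :
    l.filterMap (fun x => if p x then some (g x) else none) =
      (l.filter (fun x => decide (p x))).map g := by
  induction l with
  | nil => rfl
  | cons a t ih => by_cases h : p a <;> simp [h, ih]

-- proof-side view: the row-major list of empty-cell coordinates, as a filter of the grid
def zerosOf (pan : List (List Int)) : List (Int × Int) :=
  (PySem.List.enumerate pan 0).flatMap (fun p =>
    (PySem.List.enumerate p.2 0).filterMap (fun q =>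
      if q.2 = 0 then some (p.1, q.1) else none))

def coordsOf (pan : List (List Int)) : List (Int × Int) :=
  (PySem.List.enumerate pan 0).flatMap (fun p =>
    (PySem.List.enumerate p.2 0).map (fun q => (p.1, q.1)))

lemma zerosOf_eq_filter (pan : List (List Int)) :
    zerosOf pan = (coordsOf pan).filter (fun c => gval pan c == 0) := by
  unfold zerosOf coordsOf
  rw [List.filter_flatMap]
  apply List.flatMap_congr
  intro p hp
  obtain ⟨a, ha, rfl⟩ := (PySem.List.mem_enumerate_iff _ _ _).mp hp
  dsimp only
  rw [filterMap_if _ (fun q : Int × Int => q.2 = 0) (fun q : Int × Int => ((0 : Int) + (a : Int), q.1)),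
      List.filter_map]
  apply congrArg
  apply List.filter_congr
  intro q hq
  obtain ⟨b, hb, rfl⟩ := (PySem.List.mem_enumerate_iff _ _ _).mp hq
  have hg : gval pan ((0 : Int) + (a : Int), (0 : Int) + (b : Int)) = pan[a][b] := by
    simp only [gval]
    norm_num
    simp [List.getElem?_eq_getElem, ha, hb]
  rw [Bool.eq_iff_iff]
  simp only [Function.comp, decide_eq_true_eq, beq_iff_eq, hg]

lemma coordsAux_shape : ∀ (p q : List (List Int)) (s : Int), sameShape p q →
    (PySem.List.enumerate p s).flatMap (fun r =>
      (PySem.List.enumerate r.2 0).map (fun t => (r.1, t.1))) =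
    (PySem.List.enumerate q s).flatMap (fun r =>
      (PySem.List.enumerate r.2 0).map (fun t => (r.1, t.1))) := by
  intro p
  induction p with
  | nil =>
    intro q s h
    have := h.1
    cases q
    · rfl
    · simp at this
  | cons a p' ih =>
    intro q s h
    cases q with
    | nil => simp [sameShape] at h
    | cons b q' =>
      rw [PySem.List.enumerate_cons, PySem.List.enumerate_cons,
          List.flatMap_cons, List.flatMap_cons]
      have hlen : a.length = b.length := by
        have := h.2 0; simpa [List.getD] using this
      have key : ∀ (r : List Int), (PySem.List.enumerate r 0).map
          (fun t => ((s : Int), t.1)) =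
          (PySem.List.pyRange 0 (0 + r.length) 1).map (fun j => (s, j)) := by
        intro r
        rw [← PySem.List.map_fst_enumerate r 0, List.map_map]
        rfl
      have hsh' : sameShape p' q' := by
        refine ⟨by simpa using h.1, fun k => ?_⟩
        have := h.2 (k + 1); simpa [List.getD] using this
      rw [key a, key b, hlen, ih q' (s + 1) hsh']

lemma coordsOf_shape {p q : List (List Int)} (h : sameShape p q) :
    coordsOf p = coordsOf q := coordsAux_shape p q 0 h

lemma mem_coordsOf {pan : List (List Int)} (hr : Rect pan) (c : Int × Int) :
    c ∈ coordsOf pan ↔ inB pan c := by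
  constructor
  · intro h
    simp only [coordsOf, List.mem_flatMap] at h
    obtain ⟨p, hp, hc⟩ := h
    obtain ⟨a, ha, rfl⟩ := (PySem.List.mem_enumerate_iff _ _ _).mp hp
    simp only [List.mem_map] at hc
    obtain ⟨q, hq, rfl⟩ := hc
    obtain ⟨b, hb, rfl⟩ := (PySem.List.mem_enumerate_iff _ _ _).mp hq
    have hw := hr _ (List.getElem_mem ha)
    refine ⟨by simp, ?_, by simp, ?_⟩
    · simp only []
      omega
    · simp only []
      rw [← hw]
      omega
  · rintro ⟨h1, h2, h3, h4⟩
    simp only [coordsOf, List.mem_flatMap, List.mem_map]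
    have ha : c.1.toNat < pan.length := by omega
    have hw := hr _ (List.getElem_mem ha)
    have hb : c.2.toNat < pan[c.1.toNat].length := by rw [hw]; omega
    refine ⟨((0 : Int) + (c.1.toNat : Int), pan[c.1.toNat]), ?_, ?_⟩
    · exact (PySem.List.mem_enumerate_iff _ _ _).mpr ⟨c.1.toNat, ha, rfl⟩
    · refine ⟨((0 : Int) + (c.2.toNat : Int), pan[c.1.toNat][c.2.toNat]), ?_, ?_⟩
      · exact (PySem.List.mem_enumerate_iff _ _ _).mpr ⟨c.2.toNat, hb, rfl⟩
      · apply Prod.ext_iff.mpr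
        constructor <;> simp <;> omega

lemma rowZeros_head (row : List Int) : ∀ j : Int,
    firstZeroRow row j = ((PySem.List.enumerate row j).filterMap
      (fun q => if q.2 = 0 then some q.1 else none)).head? := by
  induction row with
  | nil => intro j; rfl
  | cons v rest ih =>
    intro j
    rw [PySem.List.enumerate_cons, List.filterMap_cons]
    by_cases h : v = 0
    · simp [firstZeroRow, h]
    · simp only [firstZeroRow, h, if_false, if_neg h]
      exact ih (j + 1)

lemma firstZeroAux_head : ∀ (pan : List (List Int)) (s : Int),
    firstZeroAux pan s = ((PySem.List.enumerate pan s).flatMap (fun p =>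
      (PySem.List.enumerate p.2 0).filterMap
        (fun q => if q.2 = 0 then some (p.1, q.1) else none))).head? := by
  intro pan
  induction pan with
  | nil => intro s; rfl
  | cons row rest ih =>
    intro s
    rw [PySem.List.enumerate_cons, List.flatMap_cons, List.head?_append]
    dsimp only
    have hrow := rowZeros_head row 0
    rw [filterMap_if _ (fun q : Int × Int => q.2 = 0) (fun q : Int × Int => q.1),
        List.head?_map] at hrow
    rw [filterMap_if _ (fun q : Int × Int => q.2 = 0) (fun q : Int × Int => (((s : Int), q.1) : Int × Int)),
        List.head?_map]
    cases hh : ((PySem.List.enumerate row 0).filter (fun q => decide (q.2 = 0))).head? with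
    | none =>
      have h0 : firstZeroRow row 0 = none := by
        rw [hrow, hh]; rfl
      simp only [firstZeroAux, h0, hh, Option.map_none, Option.none_or]
      exact ih (s + 1)
    | some q0 =>
      have h0 : firstZeroRow row 0 = some q0.1 := by
        rw [hrow, hh]; rfl
      simp only [firstZeroAux, h0, hh, Option.map_some, Option.some_or]

lemma firstZero_eq_head (pan : List (List Int)) :
    firstZeroAux pan 0 = (zerosOf pan).head? := firstZeroAux_head pan 0

lemma cellsT_nodup (t : Nat) (ht : t < 4) (y x : Int) : (cellsT t y x).Nodup := by
  interval_cases t <;> simp [cellsT, shapesB, Prod.ext_iff] <;> omega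

lemma cellsT_mem_anchor (t : Nat) (ht : t < 4) (y x : Int) : (y, x) ∈ cellsT t y x := by
  interval_cases t <;> simp [cellsT, shapesB]

-- ===== the count-dict layer =====

def wOpt (o : Option ((Int × Int) × Int)) : Nat := (o.map (fun p => p.2.toNat)).getD 0

def wsum (l : List ((Int × Int) × Int)) : Nat := (l.map (fun p => p.2.toNat)).sum

def combStep (cells : List (Int × Int)) (p : (Int × Int) × Int) : Option ((Int × Int) × Int) :=
  if p.1 ∈ cells then (if p.2 - 1 = 0 then none else some (p.1, p.2 - 1)) else some p

lemma filter_eq_filterMap {α : Type} (l : List α) (p : α → Bool) :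
    l.filter p = l.filterMap (fun x => if p x then some x else none) := by
  induction l with
  | nil => rfl
  | cons a t ih => by_cases h : p a <;> simp [h, ih]

lemma zcnt_eq (pan : List (List Int)) :
    zcnt pan = (coordsOf pan).filterMap
      (fun c => if gval pan c ≤ 0 then some (c, 1 - gval pan c) else none) := by
  unfold zcnt coordsOf
  rw [List.filterMap_flatMap]
  apply List.flatMap_congr
  intro p hp
  obtain ⟨a, ha, rfl⟩ := (PySem.List.mem_enumerate_iff _ _ _).mp hp
  dsimp only
  rw [List.filterMap_map]
  apply List.filterMap_congr
  intro q hq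
  obtain ⟨b, hb, rfl⟩ := (PySem.List.mem_enumerate_iff _ _ _).mp hq
  have hg : gval pan ((0 : Int) + (a : Int), (0 : Int) + (b : Int)) = pan[a][b] := by
    simp only [gval]
    norm_num
    simp [List.getElem?_eq_getElem, ha, hb]
  simp only [Function.comp, hg]

lemma mem_zcnt {pan : List (List Int)} (hr : Rect pan) (p : (Int × Int) × Int) :
    p ∈ zcnt pan ↔ inB pan p.1 ∧ gval pan p.1 ≤ 0 ∧ p.2 = 1 - gval pan p.1 := by
  rw [zcnt_eq, List.mem_filterMap]
  constructor
  · rintro ⟨c, hc, hfc⟩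
    split at hfc
    · cases hfc
      exact ⟨(mem_coordsOf hr c).mp hc, by assumption, rfl⟩
    · exact absurd hfc (by simp)
  · rintro ⟨h1, h2, h3⟩
    refine ⟨p.1, (mem_coordsOf hr p.1).mpr h1, ?_⟩
    rw [if_pos h2, ← h3]

lemma zs_eq {pan : List (List Int)} :
    (zcnt pan).filterMap (fun p => if p.2 = 1 then some p.1 else none) = zerosOf pan := by
  rw [zcnt_eq, List.filterMap_filterMap, zerosOf_eq_filter, filter_eq_filterMap]
  apply List.filterMap_congr
  intro c _
  by_cases h : gval pan c = 0
  · simp [h]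
  · by_cases h2 : gval pan c ≤ 0 <;> simp [h, h2] <;> omega

lemma foldl_decStep_eq (cells : List (Int × Int)) (hnd : cells.Nodup) :
    ∀ l : List ((Int × Int) × Int), cells.foldl decStep l = l.filterMap (combStep cells) := by
  induction cells with
  | nil =>
    intro l
    simp [combStep, List.filterMap_some]
  | cons c cs ih =>
    intro l
    have hcs : c ∉ cs := (List.nodup_cons.mp hnd).1
    rw [List.foldl_cons, ih (List.nodup_cons.mp hnd).2, decStep, List.filterMap_filterMap]
    apply List.filterMap_congr
    intro p _
    by_cases h1 : p.1 = c
    · by_cases h2 : p.2 - 1 = 0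
      · simp [combStep, h1, h2]
      · simp [combStep, h1, h2, hcs]
    · by_cases h3 : p.1 ∈ cs <;> simp [combStep, h1, h3]

lemma wsum_filterMap_le_sum {α : Type} (l : List α) (F : α → Option ((Int × Int) × Int))
    (h : α → Nat) (hle : ∀ p ∈ l, wOpt (F p) ≤ h p) :
    wsum (l.filterMap F) ≤ (l.map h).sum := by
  induction l with
  | nil => simp [wsum]
  | cons a t ih =>
    rw [List.filterMap_cons]
    have hta : ∀ p ∈ t, wOpt (F p) ≤ h p := fun p hp => hle p (List.mem_cons_of_mem _ hp)
    have hha := hle a List.mem_cons_self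
    cases hfa : F a with
    | none =>
      calc wsum (t.filterMap F) ≤ (t.map h).sum := ih hta
        _ ≤ ((a :: t).map h).sum := by simp
    | some q =>
      rw [hfa] at hha
      simp only [wOpt, Option.map_some, Option.getD_some] at hha
      have := ih hta
      simp only [wsum, List.map_cons, List.sum_cons] at *
      omega

lemma wsum_filterMap_lt (l : List ((Int × Int) × Int))
    (F : (Int × Int) × Int → Option ((Int × Int) × Int))
    (hle : ∀ p ∈ l, wOpt (F p) ≤ p.2.toNat) (q : (Int × Int) × Int) (hq : q ∈ l)
    (hstrict : wOpt (F q) < q.2.toNat) : wsum (l.filterMap F) < wsum l := by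
  induction l with
  | nil => simp at hq
  | cons a t ih =>
    have hta : ∀ p ∈ t, wOpt (F p) ≤ p.2.toNat := fun p hp => hle p (List.mem_cons_of_mem _ hp)
    have hle_t : wsum (t.filterMap F) ≤ (t.map (fun p => p.2.toNat)).sum :=
      wsum_filterMap_le_sum t F _ hta
    have hha := hle a List.mem_cons_self
    rcases List.mem_cons.mp hq with hqa | hq'
    · rw [hqa] at hstrict
      rw [List.filterMap_cons]
      cases hfa : F a with
      | none =>
        rw [hfa] at hstrict
        simp only [wOpt, Option.map_none, Option.getD_none] at hstrict
        simp only [wsum, List.map_cons, List.sum_cons] at *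
        omega
      | some r =>
        rw [hfa] at hstrict
        simp only [wOpt, Option.map_some, Option.getD_some] at hstrict
        simp only [wsum, List.map_cons, List.sum_cons] at *
        omega
    · have hIH := ih hta hq'
      rw [List.filterMap_cons]
      cases hfa : F a with
      | none =>
        simp only [wsum, List.map_cons, List.sum_cons] at *
        omega
      | some r =>
        rw [hfa] at hha
        simp only [wOpt, Option.map_some, Option.getD_some] at hha
        simp only [wsum, List.map_cons, List.sum_cons] at *
        omega

lemma update_eq {pan : List (List Int)} (hr : Rect pan) (cells : List (Int × Int))
    (hnd : cells.Nodup) (hall : ∀ c ∈ cells, inB pan c ∧ gval pan c ≤ 0) :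
    zcnt ((cells.foldl (stepA 1) (pan, true)).1) = (zcnt pan).filterMap (combStep cells) := by
  have hrG : RectG pan := (rect_iff pan).mp hr
  have hsh : sameShape ((cells.foldl (stepA 1) (pan, true)).1) pan := fold_shape 1 _ (pan, true)
  rw [zcnt_eq, coordsOf_shape hsh, zcnt_eq, List.filterMap_filterMap]
  apply List.filterMap_congr
  intro c hc
  have hin : inB pan c := (mem_coordsOf hr c).mp hc
  have hval : gval ((cells.foldl (stepA 1) (pan, true)).1) c =
      gval pan c + (if c ∈ cells ∧ inB pan c then 1 else 0) :=
    fold_val 1 cells hnd (pan, true) hrG c hin.1 hin.2.2.1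
  by_cases hmem : c ∈ cells
  · have hg0 : gval pan c ≤ 0 := (hall c hmem).2
    rw [hval, if_pos (show c ∈ cells ∧ inB pan c from ⟨hmem, hin⟩), if_pos hg0,
      Option.bind_some, combStep]
    dsimp only
    rw [if_pos hmem]
    by_cases hz0 : gval pan c = 0
    · rw [if_neg (by omega), if_pos (by omega)]
    · rw [if_pos (by omega), if_neg (by omega)]
      simp only [Option.some_inj, Prod.ext_iff]
      exact ⟨by trivial, by ring⟩
  · rw [hval, if_neg (show ¬(c ∈ cells ∧ inB pan c) from fun hh => hmem hh.1), add_zero]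
    by_cases hg : gval pan c ≤ 0
    · rw [if_pos hg, Option.bind_some, combStep]
      dsimp only
      rw [if_neg hmem]
    · rw [if_neg hg]
      rfl

-- the first entry of zs is an entry of the dict with count 1
lemma anchor_mem' {cnt : List ((Int × Int) × Int)} {y x : Int} {rest : List (Int × Int)}
    (hz : cnt.filterMap (fun p => if p.2 = 1 then some p.1 else none) = (y, x) :: rest) :
    ((y, x), 1) ∈ cnt := by
  have hmem : (y, x) ∈ cnt.filterMap (fun p => if p.2 = 1 then some p.1 else none) := by
    rw [hz]; exact List.mem_cons_self
  obtain ⟨p, hp, hfp⟩ := List.mem_filterMap.mp hmem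
  by_cases h1 : p.2 = 1
  · rw [if_pos h1] at hfp
    have h2 : p.1 = (y, x) := Option.some_inj.mp hfp
    have : p = ((y, x), 1) := Prod.ext_iff.mpr ⟨h2, h1⟩
    rw [← this]
    exact hp
  · rw [if_neg h1] at hfp
    exact absurd hfp (by simp)

-- covering a shape anchored at the first empty cell strictly decreases the state's weight
lemma wsum_dec {cnt : List ((Int × Int) × Int)} {cells : List (Int × Int)} {y x : Int}
    (hnd : cells.Nodup) (hmem : ((y, x), 1) ∈ cnt) (hc : (y, x) ∈ cells) :
    wsum (cells.foldl decStep cnt) < wsum cnt := by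
  rw [foldl_decStep_eq cells hnd]
  refine wsum_filterMap_lt _ _ ?_ ((y, x), 1) hmem ?_
  · intro p hp
    unfold combStep wOpt
    split_ifs <;> simp <;> omega
  · simp [combStep, wOpt, hc]

-- ===== per-shape bridge (A-side) =====
lemma step_t (f g' : Nat) (pan : List (List Int)) (y x : Int) (rest : List (Int × Int))
    (t : Nat) (ht : t < 4) (hr : Rect pan)
    (hz : zerosOf pan = (y, x) :: rest)
    (hf : wsum (zcnt pan) < f + 1) (hg : wsum (zcnt pan) < g' + 1)
    (IH : ∀ (pan : List (List Int)) (g : Nat), Rect pan →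
      wsum (zcnt pan) < f → wsum (zcnt pan) < g →
      bdcoverFuel f pan = countAux g (zcnt pan)) :
    (setting pan x y t 1).2 = (cellsT t y x).all (fun c => (zcnt pan).any (fun p => p.1 == c))
    ∧ ((setting pan x y t 1).2 = true →
        bdcoverFuel f (setting pan x y t 1).1 =
          countAux g' ((cellsT t y x).foldl decStep (zcnt pan)))
    ∧ (setting (setting pan x y t 1).1 x y t (-1)).1 = pan := by
  have hrG := (rect_iff pan).mp hr
  have hnd := cellsT_nodup t ht y x
  have hkey : ∀ c : Int × Int,
      ((zcnt pan).any (fun p => p.1 == c) = true) ↔ (inB pan c ∧ gval pan c ≤ 0) := by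
    intro c
    rw [List.any_eq_true]
    constructor
    · rintro ⟨p, hp, hpc⟩
      have hm := (mem_zcnt hr p).mp hp
      have hc : p.1 = c := by simpa using hpc
      rw [← hc]
      exact ⟨hm.1, hm.2.1⟩
    · rintro ⟨h1, h2⟩
      exact ⟨(c, 1 - gval pan c), (mem_zcnt hr _).mpr ⟨h1, h2, rfl⟩, by simp⟩
  have hok : (setting pan x y t 1).2 = true ↔
      ∀ c ∈ cellsT t y x, inB pan c ∧ gval pan c ≤ 0 := by
    rw [setting_eq_fold pan x y 1 t ht, fold_snd 1 _ hnd pan hrG]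
    constructor
    · intro h c hc
      obtain ⟨h1, h2⟩ := h c hc
      exact ⟨h1, by omega⟩
    · intro h c hc
      obtain ⟨h1, h2⟩ := h c hc
      exact ⟨h1, by omega⟩
  refine ⟨?_, ?_, ?_⟩
  · rw [Bool.eq_iff_iff, hok, List.all_eq_true]
    constructor
    · intro h c hc
      exact (hkey c).mpr (h c hc)
    · intro h c hc
      exact (hkey c).mp (h c hc)
  · intro hok2
    have hall := hok.mp hok2
    have hfold : (setting pan x y t 1).1 = ((cellsT t y x).foldl (stepA 1) (pan, true)).1 := by
      rw [setting_eq_fold pan x y 1 t ht]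
    have hsh : sameShape (setting pan x y t 1).1 pan := by
      rw [hfold]; exact fold_shape 1 _ (pan, true)
    have hr1 : Rect (setting pan x y t 1).1 := (rect_iff _).mpr (rectG_of_sameShape hsh hrG)
    have hupd : zcnt (setting pan x y t 1).1 = (zcnt pan).filterMap (combStep (cellsT t y x)) := by
      rw [hfold]; exact update_eq hr _ hnd hall
    have hlt : wsum (zcnt (setting pan x y t 1).1) < wsum (zcnt pan) := by
      rw [hupd, ← foldl_decStep_eq _ hnd]
      exact wsum_dec hnd (anchor_mem' (zs_eq.trans hz)) (cellsT_mem_anchor t ht y x)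
    rw [IH _ g' hr1 (by omega) (by omega), hupd, ← foldl_decStep_eq _ hnd]
  · rw [setting_eq_fold _ x y (-1) t ht, setting_eq_fold pan x y 1 t ht]
    exact fold_undo _ hnd pan hrG

lemma main_lemma (f : Nat) :
    ∀ (pan : List (List Int)) (g : Nat), Rect pan →
      wsum (zcnt pan) < f → wsum (zcnt pan) < g →
      bdcoverFuel f pan = countAux g (zcnt pan) := by
  induction f with
  | zero => intro pan g _ hf _; omega
  | succ f IH =>
    intro pan g hr hf hg
    obtain ⟨g', rfl⟩ : ∃ g'', g = g'' + 1 := ⟨g - 1, by omega⟩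
    rcases hzz : zerosOf pan with _ | ⟨⟨y, x⟩, rest⟩
    · have h0 : firstZeroAux pan 0 = none := by rw [firstZero_eq_head, hzz]; rfl
      have hzs : (zcnt pan).filterMap (fun p => if p.2 = 1 then some p.1 else none) = [] :=
        zs_eq.trans hzz
      simp only [bdcoverFuel, h0, countAux, hzs]
    · have h0 : firstZeroAux pan 0 = some (y, x) := by rw [firstZero_eq_head, hzz]; rfl
      have hzs : (zcnt pan).filterMap (fun p => if p.2 = 1 then some p.1 else none) =
          (y, x) :: rest := zs_eq.trans hzz
      obtain ⟨ha0, hb0, hc0⟩ := step_t f g' pan y x rest 0 (by omega) hr hzz hf hg IH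
      obtain ⟨ha1, hb1, hc1⟩ := step_t f g' pan y x rest 1 (by omega) hr hzz hf hg IH
      obtain ⟨ha2, hb2, hc2⟩ := step_t f g' pan y x rest 2 (by omega) hr hzz hf hg IH
      obtain ⟨ha3, hb3, hc3⟩ := step_t f g' pan y x rest 3 (by omega) hr hzz hf hg IH
      simp only [cellsT, shapesB, List.getD, List.getElem?_cons_zero, List.getElem?_cons_succ,
        Option.getD_some, List.map_cons, List.map_nil] at ha0 ha1 ha2 ha3 hb0 hb1 hb2 hb3
      simp only [bdcoverFuel, h0, countAux, hzs, shapesB,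
        show (List.range 4) = [0, 1, 2, 3] from rfl,
        List.foldl_cons, List.foldl_nil, List.map_cons, List.map_nil]
      rw [hc0, hc1, hc2]
      rw [ha0, ha1, ha2, ha3]
      split_ifs <;>
        (repeat (first
          | rw [hb0 (by rw [ha0]; assumption)]
          | rw [hb1 (by rw [ha1]; assumption)]
          | rw [hb2 (by rw [ha2]; assumption)]
          | rw [hb3 (by rw [ha3]; assumption)])) <;>
        rfl

lemma sum_flatMap_eq {α : Type} (l : List α) (g : α → List Nat) :
    (l.flatMap g).sum = (l.map (fun r => (g r).sum)).sum := by
  induction l with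
  | nil => rfl
  | cons a t ih => simp [List.flatMap_cons, ih]

lemma fuel_bound {pan : List (List Int)} :
    wsum (zcnt pan) ≤
      pan.foldl (fun a r => r.foldl (fun b v => b + ((1 - v).toNat + 1)) a) 0 := by
  have hrow : ∀ (r : List Int) (n : Nat),
      r.foldl (fun b v => b + ((1 - v).toNat + 1)) n =
        n + (r.map (fun v => (1 - v).toNat + 1)).sum := by
    intro r
    induction r with
    | nil => intro n; simp
    | cons v t ih =>
      intro n
      rw [List.foldl_cons, ih, List.map_cons, List.sum_cons]
      omega
  have houter : ∀ (l : List (List Int)) (n : Nat),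
      l.foldl (fun a r => r.foldl (fun b v => b + ((1 - v).toNat + 1)) a) n =
        n + (l.map (fun r => (r.map (fun v => (1 - v).toNat + 1)).sum)).sum := by
    intro l
    induction l with
    | nil => intro n; simp
    | cons r t ih =>
      intro n
      rw [List.foldl_cons, hrow, ih, List.map_cons, List.sum_cons]
      omega
  rw [houter, Nat.zero_add]
  unfold zcnt wsum
  rw [List.map_flatMap, sum_flatMap_eq]
  rw [show pan.map (fun r => (r.map (fun v => (1 - v).toNat + 1)).sum) =
      (PySem.List.enumerate pan 0).map
        ((fun r => (r.map (fun v => (1 - v).toNat + 1)).sum) ∘ (fun p => p.2)) by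
    rw [← List.map_map]
    rw [PySem.List.map_snd_enumerate pan 0]]
  apply List.sum_le_sum
  intro p _
  simp only [Function.comp]
  calc ((List.filterMap (fun q => if q.2 ≤ 0 then some ((p.1, q.1), 1 - q.2) else none)
        (PySem.List.enumerate p.2 0)).map (fun r => r.2.toNat)).sum
      ≤ ((PySem.List.enumerate p.2 0).map (fun q => (1 - q.2).toNat + 1)).sum := by
        apply wsum_filterMap_le_sum
        intro q _
        unfold wOpt
        split_ifs <;> simp
    _ = (p.2.map (fun v => (1 - v).toNat + 1)).sum := by
        rw [show (fun q : Int × Int => (1 - q.2).toNat + 1) =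
            ((fun v => (1 - v).toNat + 1) ∘ (fun q : Int × Int => q.2)) from rfl,
          ← List.map_map, PySem.List.map_snd_enumerate p.2 0]

lemma zerosOf_nil_of_nozero {pan : List (List Int)}
    (h : ∀ row ∈ pan, ∀ v ∈ row, v ≠ 0) : zerosOf pan = [] := by
  rw [List.eq_nil_iff_forall_not_mem]
  intro c hc
  simp only [zerosOf, List.mem_flatMap, List.mem_filterMap] at hc
  obtain ⟨p, hp, q, hq, hq2⟩ := hc
  obtain ⟨a, ha, rfl⟩ := (PySem.List.mem_enumerate_iff _ _ _).mp hp
  obtain ⟨b, hb, rfl⟩ := (PySem.List.mem_enumerate_iff _ _ _).mp hq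
  dsimp only at hq2
  split at hq2
  · exact h _ (List.getElem_mem ha) _ (List.getElem_mem hb) (by assumption)
  · exact absurd hq2 (by simp)

lemma zs_nil_of_nozero {pan : List (List Int)}
    (h : ∀ row ∈ pan, ∀ v ∈ row, v ≠ 0) :
    (zcnt pan).filterMap (fun p => if p.2 = 1 then some p.1 else none) = [] :=
  zs_eq.trans (zerosOf_nil_of_nozero h)

-- ===== the B-side frontier layer =====

-- weighted sum of a frontier: way-count times the naive count of each state
def SumF (f : Nat) (l : List (List ((Int × Int) × Int) × Int)) : Int :=
  (l.map (fun p => p.2 * countAux f p.1)).sum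

-- PySem.Dict.insert, spelled out on the items list
def insertL {κ ν : Type} [BEq κ] (l : List (κ × ν)) (k : κ) (v : ν) : List (κ × ν) :=
  if l.any (fun p => p.1 == k) then l.map (fun p => if p.1 == k then (k, v) else p)
  else l ++ [(k, v)]

lemma items_insert {κ ν : Type} [BEq κ] (d : PySem.Dict κ ν) (k : κ) (v : ν) :
    (d.insert k v).items = insertL d.items k v := by
  unfold PySem.Dict.insert PySem.Dict.contains insertL
  split <;> rfl

lemma getD_eq_find {κ ν : Type} [BEq κ] (d : PySem.Dict κ ν) (k : κ) (d0 : ν) :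
    d.getD k d0 = ((d.items.find? (fun p => p.1 == k)).map Prod.snd).getD d0 := rfl

lemma mem_items_insert {κ ν : Type} [BEq κ] (d : PySem.Dict κ ν) (k : κ) (v : ν)
    (q : κ × ν) (hq : q ∈ (d.insert k v).items) : q = (k, v) ∨ q ∈ d.items := by
  rw [items_insert] at hq
  unfold insertL at hq
  split at hq
  · simp only [List.mem_map] at hq
    obtain ⟨p, hp, hpq⟩ := hq
    split at hpq
    · exact Or.inl hpq.symm
    · exact Or.inr (hpq ▸ hp)
  · rcases List.mem_append.mp hq with h | h
    · exact Or.inr h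
    · exact Or.inl (by simpa using h)

lemma sum_insertAdd_aux {κ : Type} [BEq κ] [LawfulBEq κ] (k : κ) (w : Int) (F : κ → Int) :
    ∀ (l : List (κ × Int)), (l.map Prod.fst).Nodup →
      ∀ v : Int, v = ((l.find? (fun p => p.1 == k)).map Prod.snd).getD 0 + w →
      ((insertL l k v).map (fun p => p.2 * F p.1)).sum
        = ((l.map (fun p => p.2 * F p.1)).sum) + w * F k := by
  intro l
  induction l with
  | nil =>
    intro _ v hv
    simp only [List.find?_nil, Option.map_none, Option.getD_none, zero_add] at hv
    simp [insertL, hv]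
  | cons a t ih =>
    intro hnd v hv
    by_cases hak : a.1 = k
    · -- head is the key: tail has no occurrence, replacement touches only the head
      have hfind : ((a :: t).find? (fun p => p.1 == k)) = some a := by
        simp [List.find?_cons, hak]
      rw [hfind] at hv
      simp only [Option.map_some, Option.getD_some] at hv
      rw [List.map_cons] at hnd
      have hnotin : a.1 ∉ t.map Prod.fst := (List.nodup_cons.mp hnd).1
      have htno : ∀ p ∈ t, ¬ (p.1 == k) = true := by
        intro p hp hpk
        have h1 : p.1 = k := by simpa using hpk
        refine hnotin ?_
        rw [hak, ← h1]
        exact List.mem_map_of_mem hp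
      have hmapid : t.map (fun p => if p.1 == k then (k, v) else p) = t := by
        conv_rhs => rw [← List.map_id t]
        apply List.map_congr_left
        intro p hp
        rw [if_neg (htno p hp)]
        rfl
      have hcase : insertL (a :: t) k v = (k, v) :: t := by
        unfold insertL
        rw [if_pos (by simp [hak]), List.map_cons, if_pos (by simpa using hak), hmapid]
      rw [hcase, List.map_cons, List.sum_cons, List.map_cons, List.sum_cons, hv, hak]
      ring
    · have hfind : ((a :: t).find? (fun p => p.1 == k)) = t.find? (fun p => p.1 == k) := by
        simp [List.find?_cons, hak]
      rw [hfind] at hv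
      have hane : (a.1 == k) = false := by simpa using hak
      have hcons : insertL (a :: t) k v = a :: insertL t k v := by
        unfold insertL
        simp only [List.any_cons, hane, Bool.false_or]
        split
        · simp [hane]
        · simp
      rw [hcons, List.map_cons, List.sum_cons,
        ih (by simpa using (List.nodup_cons.mp (by simpa using hnd)).2) v hv,
        List.map_cons, List.sum_cons]
      ring

-- nxt[k] = nxt.get(k, 0) + w adds w * F k to the weighted sum over the dict
lemma sum_items_insertAdd {κ : Type} [BEq κ] [LawfulBEq κ] (d : PySem.Dict κ Int)
    (hnd : d.keys.Nodup) (k : κ) (w : Int) (F : κ → Int) :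
    (((d.modify k 0 (· + w)).items).map (fun p => p.2 * F p.1)).sum
      = ((d.items.map (fun p => p.2 * F p.1)).sum) + w * F k := by
  unfold PySem.Dict.modify
  rw [items_insert]
  exact sum_insertAdd_aux k w F d.items (by simpa [PySem.Dict.keys] using hnd) _
    (by rw [getD_eq_find])

-- each of the four shapes contains the anchor offset (0,0) and maps to distinct cells
lemma shape_facts {s : List (Int × Int)} (h : s ∈ shapesB) (y x : Int) :
    (y, x) ∈ s.map (fun d => (y + d.1, x + d.2)) ∧
      (s.map (fun d => (y + d.1, x + d.2))).Nodup := by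
  simp only [shapesB, List.mem_cons, List.not_mem_nil, or_false] at h
  rcases h with rfl | rfl | rfl | rfl <;>
    exact ⟨by simp, by simp [Prod.ext_iff] <;> omega⟩

lemma countAux_succ_cons {f : Nat} {cnt : List ((Int × Int) × Int)} {y x : Int}
    {rest : List (Int × Int)}
    (hzs : cnt.filterMap (fun p => if p.2 = 1 then some p.1 else none) = (y, x) :: rest) :
    countAux (f + 1) cnt = shapesB.foldl (fun total shape =>
        let cells := shape.map (fun d => (y + d.1, x + d.2))
        if cells.all (fun c => cnt.any (fun p => p.1 == c)) then
          total + countAux f (cells.foldl decStep cnt)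
        else total) 0 := by
  simp only [countAux, hzs]

lemma countAux_succ_nil {f : Nat} {cnt : List ((Int × Int) × Int)}
    (hzs : cnt.filterMap (fun p => if p.2 = 1 then some p.1 else none) = []) :
    countAux (f + 1) cnt = 1 := by
  simp only [countAux, hzs]

-- expanding one state into the next-level dict adds ways * (its one-step count) to the sum
lemma shapes_fold (f : Nat) (cnt : List ((Int × Int) × Int)) (w : Int) (y x : Int)
    (hanchor : ((y, x), 1) ∈ cnt) (hwc : wsum cnt < f + 1) :
    ∀ (sh : List (List (Int × Int))), (∀ s ∈ sh, s ∈ shapesB) →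
    ∀ (nxt : PySem.Dict (List ((Int × Int) × Int)) Int) (total : Int),
      nxt.keys.Nodup → (∀ q ∈ nxt.items, wsum q.1 < f) →
      ((((sh.foldl (placeStep cnt w y x) nxt).items).map (fun p => p.2 * countAux f p.1)).sum
          = ((nxt.items.map (fun p => p.2 * countAux f p.1)).sum)
            + w * ((sh.foldl (fun total shape =>
                let cells := shape.map (fun d => (y + d.1, x + d.2))
                if cells.all (fun c => cnt.any (fun p => p.1 == c)) then
                  total + countAux f (cells.foldl decStep cnt)
                else total) total) - total))
      ∧ (sh.foldl (placeStep cnt w y x) nxt).keys.Nodup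
      ∧ ∀ q ∈ (sh.foldl (placeStep cnt w y x) nxt).items, wsum q.1 < f := by
  intro sh
  induction sh with
  | nil =>
    intro _ nxt total hnd hws
    exact ⟨by simp, hnd, hws⟩
  | cons s sh ih =>
    intro hsh nxt total hnd hws
    have hs : s ∈ shapesB := hsh s List.mem_cons_self
    have hsh' : ∀ s' ∈ sh, s' ∈ shapesB := fun s' hs' => hsh s' (List.mem_cons_of_mem _ hs')
    obtain ⟨hanc, hndc⟩ := shape_facts hs y x
    rw [List.foldl_cons, List.foldl_cons]
    by_cases hvalid :
        (s.map (fun d => (y + d.1, x + d.2))).all (fun c => cnt.any (fun q => q.1 == c)) = true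
    · have hplace : placeStep cnt w y x nxt s =
          nxt.modify ((s.map (fun d => (y + d.1, x + d.2))).foldl decStep cnt) 0 (· + w) := by
        unfold placeStep
        rw [if_pos hvalid]
      have hk2lt : wsum ((s.map (fun d => (y + d.1, x + d.2))).foldl decStep cnt) < f := by
        have := wsum_dec hndc hanchor hanc
        omega
      have hnd2 : (placeStep cnt w y x nxt s).keys.Nodup := by
        rw [hplace]
        unfold PySem.Dict.modify
        exact PySem.Dict.nodup_keys_insert _ _ _ hnd
      have hws2 : ∀ q ∈ (placeStep cnt w y x nxt s).items, wsum q.1 < f := by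
        intro q hq
        rw [hplace] at hq
        unfold PySem.Dict.modify at hq
        rcases mem_items_insert _ _ _ q hq with rfl | hq'
        · exact hk2lt
        · exact hws q hq'
      obtain ⟨h1, h2, h3⟩ := ih hsh' (placeStep cnt w y x nxt s)
        (total + countAux f ((s.map (fun d => (y + d.1, x + d.2))).foldl decStep cnt)) hnd2 hws2
      refine ⟨?_, h2, h3⟩
      rw [h1, hplace, sum_items_insertAdd nxt hnd _ w (countAux f)]
      simp only [hvalid, if_true]
      ring
    · have hplace : placeStep cnt w y x nxt s = nxt := by
        unfold placeStep
        rw [if_neg (by simpa using hvalid)]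
      obtain ⟨h1, h2, h3⟩ := ih hsh' (placeStep cnt w y x nxt s) total
        (by rw [hplace]; exact hnd) (by rw [hplace]; exact hws)
      refine ⟨?_, h2, h3⟩
      rw [h1, hplace]
      simp only [hvalid, if_false]
      split
      · rename_i hc; exact absurd hc (by simpa using hvalid)
      · rfl

-- one whole level of the loop: done plus the weighted sum is preserved (fuel drops by one)
lemma level_fold (f : Nat) :
    ∀ (l : List (List ((Int × Int) × Int) × Int))
      (acc : Int × PySem.Dict (List ((Int × Int) × Int)) Int),
      (∀ p ∈ l, wsum p.1 < f + 1) → acc.2.keys.Nodup → (∀ q ∈ acc.2.items, wsum q.1 < f) →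
      ((l.foldl levelStep acc).1 + SumF f (l.foldl levelStep acc).2.items
          = acc.1 + SumF f acc.2.items + SumF (f + 1) l)
      ∧ (l.foldl levelStep acc).2.keys.Nodup
      ∧ ∀ q ∈ (l.foldl levelStep acc).2.items, wsum q.1 < f := by
  intro l
  induction l with
  | nil =>
    intro acc _ hnd hws
    exact ⟨by simp [SumF], hnd, hws⟩
  | cons p l ih =>
    intro acc hwl hnd hws
    have hwp : wsum p.1 < f + 1 := hwl p List.mem_cons_self
    have hwl' : ∀ p' ∈ l, wsum p'.1 < f + 1 := fun p' hp' => hwl p' (List.mem_cons_of_mem _ hp')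
    rw [List.foldl_cons]
    rcases hzs : p.1.filterMap (fun q => if q.2 = 1 then some q.1 else none) with _ | ⟨⟨y, x⟩, rest⟩
    · have hstep : levelStep acc p = (acc.1 + p.2, acc.2) := by
        unfold levelStep
        rw [hzs]
      obtain ⟨h1, h2, h3⟩ := ih (levelStep acc p) hwl' (by rw [hstep]; exact hnd)
        (by rw [hstep]; exact hws)
      refine ⟨?_, h2, h3⟩
      rw [h1, hstep]
      simp only [SumF, List.map_cons, List.sum_cons, countAux_succ_nil hzs]
      ring
    · have hstep : levelStep acc p = (acc.1, shapesB.foldl (placeStep p.1 p.2 y x) acc.2) := by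
        unfold levelStep
        rw [hzs]
      obtain ⟨hsum, hnd2, hws2⟩ := shapes_fold f p.1 p.2 y x (anchor_mem' hzs) hwp
        shapesB (fun _ h => h) acc.2 0 hnd hws
      obtain ⟨h1, h2, h3⟩ := ih (levelStep acc p) hwl' (by rw [hstep]; exact hnd2)
        (by rw [hstep]; exact hws2)
      refine ⟨?_, h2, h3⟩
      rw [h1, hstep]
      simp only [SumF] at hsum ⊢
      rw [hsum, List.map_cons, List.sum_cons, countAux_succ_cons hzs]
      ring

-- the whole loop: it returns done plus the weighted sum of the frontier
lemma loopB_eq :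
    ∀ (f : Nat) (done : Int) (fr : PySem.Dict (List ((Int × Int) × Int)) Int),
      fr.keys.Nodup → (∀ q ∈ fr.items, wsum q.1 < f) →
      loopB f done fr = done + SumF f fr.items := by
  intro f
  induction f with
  | zero =>
    intro done fr _ hws
    have hnil : fr.items = [] := by
      cases h : fr.items with
      | nil => rfl
      | cons q t => exact absurd (hws q (h ▸ List.mem_cons_self)) (by omega)
    simp [loopB, SumF, hnil]
  | succ f ih =>
    intro done fr hnd hws
    cases hit : fr.items with
    | nil =>
      have hemp : fr.items.isEmpty = true := by rw [hit]; rfl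
      simp [loopB, hemp, hit, SumF]
    | cons p t =>
      obtain ⟨hsum, hnd2, hws2⟩ := level_fold f fr.items (done, PySem.Dict.empty) hws
        PySem.Dict.nodup_keys_empty (by intro q hq; exact absurd hq (by simp [PySem.Dict.empty]))
      have hemp : fr.items.isEmpty = false := by rw [hit]; rfl
      simp only [loopB, hemp, Bool.false_eq_true, if_false]
      show loopB f (fr.items.foldl levelStep (done, PySem.Dict.empty)).1
          (fr.items.foldl levelStep (done, PySem.Dict.empty)).2 = done + SumF (f + 1) (p :: t)
      rw [hit] at hsum hnd2 hws2 ⊢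
      rw [ih _ _ hnd2 hws2]
      have hd : (((done, PySem.Dict.empty) :
          Int × PySem.Dict (List ((Int × Int) × Int)) Int)).1 = done := rfl
      have hz0 : SumF f (((done, PySem.Dict.empty) :
          Int × PySem.Dict (List ((Int × Int) × Int)) Int)).2.items = 0 := by
        simp [SumF, PySem.Dict.empty]
      rw [hd, hz0] at hsum
      omega

lemma alt_eq_countAux (pan : List (List Int)) :
    bdcover_alt pan = countAux (wsum (zcnt pan) + 1) (zcnt pan) := by
  unfold bdcover_alt
  have hof : (PySem.Dict.ofList [(zcnt pan, (1 : Int))]).items = [(zcnt pan, (1 : Int))] := rfl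
  have hfuel : ((zcnt pan).map (fun p => p.2.toNat)).sum = wsum (zcnt pan) := rfl
  rw [hfuel, loopB_eq (wsum (zcnt pan) + 1) 0 _ (PySem.Dict.nodup_keys_ofList _)
    (by
      rw [hof]
      intro q hq
      rw [List.mem_singleton] at hq
      subst hq
      exact Nat.lt_succ_self _)]
  rw [hof]
  simp [SumF]

-- ===== VERDICT (by name: the statement is the Claim_ definition above) =====
theorem bdcover_spec : Claim_equal_bdcover := by
  intro pan _ hpre
  show bdcover pan = bdcover_alt pan
  rw [alt_eq_countAux]
  rcases hpre with hnz | hrect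
  · have hz : zerosOf pan = [] := zerosOf_nil_of_nozero hnz
    have h0 : firstZeroAux pan 0 = none := by rw [firstZero_eq_head, hz]; rfl
    simp only [bdcover, bdcoverFuel, h0, countAux_succ_nil (zs_nil_of_nozero hnz)]
  · have h1 : wsum (zcnt pan) <
        pan.foldl (fun a r => r.foldl (fun b v => b + ((1 - v).toNat + 1)) a) 0 + 1 :=
      Nat.lt_succ_of_le fuel_bound
    exact main_lemma _ pan _ hrect h1 (Nat.lt_succ_self _)
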